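-- pv_equiv track=rewrite | github.com/therealrahulsahu/py_practice | nptel_p7/prog4.py | s_path
-- ===== SOURCE A (Python) =====
-- MAX = 999999999
--
-- def s_path(grid, kill, x=0, y=0):
--     if kill == 0:
--         return 0
--     min_path = MAX
--     min_index = None
--     i = 0
--     upper = len(grid)-kill+1
--     while i < upper:
--         n_path = (grid[i][0]-x) + abs(grid[i][1]-y)
--         if n_path < min_path:
--             min_path = n_path
--             min_index = i
--         i += 1
--     return min_path + s_path(grid[min_index+1:], kill-1, grid[min_index][0], grid[min_index][1])
-- ===== SOURCE B (Python) =====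
-- def s_path(grid, kill, x=0, y=0):
--     total = 0
--     offset = 0
--     n = len(grid)
--     remaining = kill
--     while remaining > 0:
--         best = min(range(offset, n - remaining + 1),
--                    key=lambda i: (grid[i][0] - x) + abs(grid[i][1] - y))
--         total += (grid[best][0] - x) + abs(grid[best][1] - y)
--         x, y = grid[best][0], grid[best][1]
--         offset = best + 1
--         remaining -= 1
--     return total
-- ===== Notes on version B (the rewrite author's own statement) =====
-- stated objective: alternative
-- what changed: Replaces A's recursion that copies a grid slice at every step by a single iterative loop that keeps an absolute offset into the unmodified grid and picks each step's cell with min(range(offset, n-remaining+1), key=...).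
-- outside the precondition, e.g. on s_path([[0, 0], [999999999, 0]], 1, 0, 0): A returns 0, B returns 0
import Mathlib
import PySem

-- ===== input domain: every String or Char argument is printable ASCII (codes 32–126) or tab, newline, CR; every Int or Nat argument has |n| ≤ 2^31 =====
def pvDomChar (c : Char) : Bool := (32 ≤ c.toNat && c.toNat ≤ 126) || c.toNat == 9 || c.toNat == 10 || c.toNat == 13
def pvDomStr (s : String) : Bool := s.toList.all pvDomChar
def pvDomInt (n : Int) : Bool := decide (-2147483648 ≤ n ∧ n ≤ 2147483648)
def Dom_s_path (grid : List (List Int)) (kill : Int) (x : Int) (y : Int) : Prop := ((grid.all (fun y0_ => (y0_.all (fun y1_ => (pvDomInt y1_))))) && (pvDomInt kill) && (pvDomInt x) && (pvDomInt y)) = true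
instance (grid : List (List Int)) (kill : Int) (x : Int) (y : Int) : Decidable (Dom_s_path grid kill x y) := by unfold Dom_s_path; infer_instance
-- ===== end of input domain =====

-- B replaces A's recursion-with-list-slicing by a single iterative loop over an absolute
-- offset, selecting each step's cell with min(range(...), key=...); objective: alternative
-- (no slice copies, no recursion; same asymptotic cost).

-- ===== PORT A =====
def pvMAX : Int := 999999999

-- the while loop: i from 0 while i < upper, tracking (min_path, min_index); fuel = upper.toNat
def sPathScanA (grid : List (List Int)) (x y upper : Int) :
    Nat → Int → Int → Option Int → Int × Option Int
  | 0, _, minPath, minIndex => (minPath, minIndex)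
  | fuel+1, i, minPath, minIndex =>
    if i < upper then
      let row := (PySem.List.pyGet? grid i).getD []
      let nPath := ((PySem.List.pyGet? row 0).getD 0 - x) + |((PySem.List.pyGet? row 1).getD 0 - y)|
      if nPath < minPath then
        sPathScanA grid x y upper fuel (i+1) nPath (some i)
      else
        sPathScanA grid x y upper fuel (i+1) minPath minIndex
    else (minPath, minIndex)

-- the recursion; fuel = kill.toNat (exact under Pre_: kill ≥ 0 and it decreases by 1 per call)
def sPathA : Nat → List (List Int) → Int → Int → Int → Int
  | 0, _, _, _, _ => 0
  | fuel+1, grid, kill, x, y =>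
    if kill == 0 then 0
    else
      let upper : Int := (grid.length : Int) - kill + 1
      let res := sPathScanA grid x y upper upper.toNat 0 pvMAX none
      match res.2 with
      | none => res.1   -- Python raises TypeError (None + 1) here; outside Pre_
      | some idx =>
        let row := (PySem.List.pyGet? grid idx).getD []
        res.1 + sPathA fuel (PySem.List.slice grid (some (idx + 1)) none) (kill - 1)
          ((PySem.List.pyGet? row 0).getD 0) ((PySem.List.pyGet? row 1).getD 0)

def s_path (grid : List (List Int)) (kill : Int) (x : Int) (y : Int) : Int :=
  sPathA kill.toNat grid kill x y

-- ===== PORT B =====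
def bCost (grid : List (List Int)) (x y i : Int) : Int :=
  let row := (PySem.List.pyGet? grid i).getD []
  ((PySem.List.pyGet? row 0).getD 0 - x) + |((PySem.List.pyGet? row 1).getD 0 - y)|

-- the while loop of Source B: state (remaining, total, offset, x, y); fuel = kill.toNat
def sPathAltLoop (grid : List (List Int)) :
    Nat → Int → Int → Int → Int → Int → Int
  | 0, _, total, _, _, _ => total
  | fuel+1, remaining, total, offset, x, y =>
    if 0 < remaining then
      match PySem.List.min? (PySem.List.pyRange offset ((grid.length : Int) - remaining + 1) 1)
          (fun i => bCost grid x y i) with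
      | none => total   -- Python: min() on an empty range raises ValueError; outside Pre_
      | some best =>
        let row := (PySem.List.pyGet? grid best).getD []
        sPathAltLoop grid fuel (remaining - 1) (total + bCost grid x y best) (best + 1)
          ((PySem.List.pyGet? row 0).getD 0) ((PySem.List.pyGet? row 1).getD 0)
    else total

def s_path_alt (grid : List (List Int)) (kill : Int) (x : Int) (y : Int) : Int :=
  sPathAltLoop grid kill.toNat kill 0 0 x y

-- ===== PRECONDITION & SPEC =====
-- Pre_ excludes inputs where A raises (kill < 0 or kill > len(grid): IndexError/TypeError; a row
-- shorter than 2 touched with kill > 0: IndexError) and, as a stated narrowing, inputs with a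
-- cell-to-reference cost reaching A's MAX sentinel 999999999 (there A's scan can leave min_index
-- = None and raise TypeError; where A still returns, it agrees with B — see the cite).
def Pre_s_path (grid : List (List Int)) (kill : Int) (x : Int) (y : Int) : Prop :=
  0 ≤ kill ∧ kill ≤ grid.length ∧
  (kill = 0 ∨ ((∀ r ∈ grid, 2 ≤ r.length) ∧
    ∀ r ∈ grid, ∀ p ∈ (x, y) :: grid.map (fun r' => (r'.getD 0 0, r'.getD 1 0)),
      (r.getD 0 0 - p.1) + |r.getD 1 0 - p.2| < 999999999))
instance (grid : List (List Int)) (kill : Int) (x : Int) (y : Int) : Decidable (Pre_s_path grid kill x y) := by unfold Pre_s_path; infer_instance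

def pvWitness_s_path : List (List Int) × Int × Int × Int := ([[1, 2], [3, 4]], 1, 0, 0)

def Spec_s_path (grid : List (List Int)) (kill : Int) (x : Int) (y : Int) (out : Int) : Prop := out = s_path_alt grid kill x y
instance (grid : List (List Int)) (kill : Int) (x : Int) (y : Int) (out : Int) : Decidable (Spec_s_path grid kill x y out) := by unfold Spec_s_path; infer_instance

-- ===== CLAIM (what is proved, stated in full; the proofs are below) =====
def Claim_equal_s_path : Prop := ∀ (grid : List (List Int)) (kill : Int) (x : Int) (y : Int), Dom_s_path grid kill x y → Pre_s_path grid kill x y → Spec_s_path grid kill x y (s_path grid kill x y)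

-- ===== LEMMAS AND PROOFS =====

-- cost of row r seen from reference point (x, y), as both ports compute it
def pcost (r : List Int) (x y : Int) : Int :=
  ((PySem.List.pyGet? r 0).getD 0 - x) + |((PySem.List.pyGet? r 1).getD 0 - y)|

lemma pyGet?_zero (r : List Int) : PySem.List.pyGet? r 0 = r[0]? := by simp [pysem]

lemma pyGet?_one (r : List Int) : PySem.List.pyGet? r 1 = r[1]? := by simp [pysem]

lemma pcost_eq_getD (r : List Int) (x y : Int) :
    pcost r x y = (r.getD 0 0 - x) + |r.getD 1 0 - y| := by
  simp [pcost, pyGet?_zero, pyGet?_one, List.getD]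

lemma bCost_eq (grid : List (List Int)) (x y i : Int) :
    bCost grid x y i = pcost ((PySem.List.pyGet? grid i).getD []) x y := rfl

-- the fold step of Python's min(..., key=...), named so rewrites can target it
def bStep (key : Int → Int) (a : Option Int) (t : Int) : Option Int :=
  match a with
  | none => some t
  | some m => if key t < key m then some t else some m

lemma min?_eq_foldl_bStep (xs : List Int) (key : Int → Int) :
    PySem.List.min? xs key = xs.foldl (bStep key) none := by
  unfold PySem.List.min?
  apply PySem.List.foldl_congr_mem
  intro acc t _
  cases acc <;> rfl

lemma pyRange_one_nil {a b : Int} (h : b ≤ a) : PySem.List.pyRange a b 1 = [] := by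
  simp [PySem.List.pyRange, not_lt.2 h]

lemma pyGet?_shift (grid : List (List Int)) (o : Nat) (t : Int) (h0 : 0 ≤ t) :
    PySem.List.pyGet? (grid.drop o) t = PySem.List.pyGet? grid ((o : Int) + t) := by
  obtain ⟨m, rfl⟩ : ∃ m : Nat, t = (m : Int) := ⟨t.toNat, by omega⟩
  have e : ((o : Int) + m) = ((o + m : Nat) : Int) := by push_cast; ring
  rw [e, PySem.List.pyGet?_natCast, PySem.List.pyGet?_natCast, List.getElem?_drop]

lemma pyGet?_mem_of_lt (grid : List (List Int)) (m : Nat) (h : m < grid.length) :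
    PySem.List.pyGet? grid (m : Int) = some (grid[m]'h) := by
  rw [PySem.List.pyGet?_natCast]; exact List.getElem?_eq_getElem h

-- A's fueled while-loop is the fold of its step over the index range
lemma scanA_eq_fold (grid : List (List Int)) (x y upper : Int) :
    ∀ (fuel : Nat) (i mp : Int) (mi : Option Int), upper ≤ i + fuel →
      sPathScanA grid x y upper fuel i mp mi =
        (PySem.List.pyRange i upper 1).foldl
          (fun s t => if pcost ((PySem.List.pyGet? grid t).getD []) x y < s.1
                      then (pcost ((PySem.List.pyGet? grid t).getD []) x y, some t) else s)
          (mp, mi) := by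
  intro fuel
  induction fuel with
  | zero =>
    intro i mp mi h
    rw [pyRange_one_nil (by omega)]
    simp [sPathScanA]
  | succ f ih =>
    intro i mp mi h
    by_cases hi : i < upper
    · rw [PySem.List.pyRange_one_cons hi, List.foldl_cons]
      rw [sPathScanA, if_pos hi]
      simp only [pcost]
      by_cases hc : ((PySem.List.pyGet? ((PySem.List.pyGet? grid i).getD []) 0).getD 0 - x)
          + |((PySem.List.pyGet? ((PySem.List.pyGet? grid i).getD []) 1).getD 0 - y)| < mp
      · rw [if_pos hc, if_pos hc]
        exact ih (i+1) _ _ (by omega)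
      · rw [if_neg hc, if_neg hc]
        exact ih (i+1) _ _ (by omega)
    · rw [pyRange_one_nil (by omega)]
      rw [sPathScanA, if_neg hi]
      simp

-- paired traversal of A's (local-index) scan fold and B's (absolute-index) min? fold
lemma fold_pair (key cL : Int → Int) (oi E : Int)
    (hk : ∀ t : Int, 0 ≤ t → t < E → key (oi + t) = cL t) :
    ∀ (u : Nat) (lo hi j : Int),
      hi - lo = u → 0 ≤ lo → hi ≤ E → 0 ≤ j → j < E →
      ∃ j', 0 ≤ j' ∧ j' < E ∧
        (PySem.List.pyRange lo hi 1).foldl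
            (fun s t => if cL t < s.1 then (cL t, some t) else s) (cL j, some j)
          = (cL j', some j') ∧
        (PySem.List.pyRange (oi + lo) (oi + hi) 1).foldl (bStep key) (some (oi + j))
          = some (oi + j') := by
  intro u
  induction u with
  | zero =>
    intro lo hi j hu h0 hE hj0 hjE
    rw [pyRange_one_nil (by omega), pyRange_one_nil (by omega)]
    exact ⟨j, hj0, hjE, rfl, rfl⟩
  | succ v ih =>
    intro lo hi j hu h0 hE hj0 hjE
    have hlt : lo < hi := by omega
    have hlt' : oi + lo < oi + hi := by omega
    rw [PySem.List.pyRange_one_cons hlt, PySem.List.pyRange_one_cons hlt',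
        List.foldl_cons, List.foldl_cons]
    simp only [bStep]
    rw [hk lo h0 (by omega), hk j hj0 hjE]
    by_cases hc : cL lo < cL j
    · rw [if_pos hc, if_pos hc]
      obtain ⟨j', h1, h2, hA, hB⟩ := ih (lo+1) hi lo (by omega) (by omega) hE h0 (by omega)
      rw [show oi + (lo + 1) = oi + lo + 1 from by ring] at hB
      exact ⟨j', h1, h2, hA, hB⟩
    · rw [if_neg hc, if_neg hc]
      obtain ⟨j', h1, h2, hA, hB⟩ := ih (lo+1) hi j (by omega) (by omega) hE hj0 hjE
      rw [show oi + (lo + 1) = oi + lo + 1 from by ring] at hB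
      exact ⟨j', h1, h2, hA, hB⟩

-- the main loop invariant: B's loop on (grid, offset o) equals total + A's recursion on grid.drop o
lemma main_loop (grid : List (List Int))
    (hgg : ∀ r ∈ grid, ∀ r' ∈ grid,
      pcost r ((PySem.List.pyGet? r' 0).getD 0) ((PySem.List.pyGet? r' 1).getD 0) < 999999999) :
    ∀ (k : Nat) (o : Nat) (x y total : Int),
      o + k ≤ grid.length →
      (∀ r ∈ grid, pcost r x y < 999999999) →
      sPathAltLoop grid k (k : Int) total (o : Int) x y
        = total + sPathA k (grid.drop o) (k : Int) x y := by
  intro k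
  induction k with
  | zero =>
    intro o x y total h hxy
    simp [sPathAltLoop, sPathA]
  | succ k ih =>
    intro o x y total h hxy
    have hk : ∀ t : Int, 0 ≤ t → t < ((grid.length - o - k : Nat) : Int) →
        pcost ((PySem.List.pyGet? grid ((o : Int) + t)).getD []) x y
          = pcost ((PySem.List.pyGet? (grid.drop o) t).getD []) x y := by
      intro t h0 ht; rw [pyGet?_shift grid o t h0]
    have hmem : ∀ t : Int, 0 ≤ t → t < ((grid.length - o - k : Nat) : Int) →
        ∃ r, PySem.List.pyGet? (grid.drop o) t = some r ∧ r ∈ grid := by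
      intro t h0 ht
      have hlt : o + t.toNat < grid.length := by omega
      refine ⟨grid[o + t.toNat]'hlt, ?_, List.getElem_mem _⟩
      rw [pyGet?_shift grid o t h0,
        show (o : Int) + t = ((o + t.toNat : Nat) : Int) from by omega]
      exact pyGet?_mem_of_lt grid _ hlt
    have hcM : ∀ t : Int, 0 ≤ t → t < ((grid.length - o - k : Nat) : Int) →
        pcost ((PySem.List.pyGet? (grid.drop o) t).getD []) x y < 999999999 := by
      intro t h0 ht
      obtain ⟨r, hr, hrm⟩ := hmem t h0 ht
      rw [hr, Option.getD_some]
      exact hxy r hrm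
    have hu1 : 1 ≤ grid.length - o - k := by omega
    -- unfold A's step
    rw [sPathA]
    rw [if_neg (by simp only [beq_iff_eq]; omega : ¬ ((((k + 1 : Nat) : Int)) == 0) = true)]
    simp only []
    have hupper : ((grid.drop o).length : Int) - ((k + 1 : Nat) : Int) + 1
        = ((grid.length - o - k : Nat) : Int) := by
      simp [List.length_drop]; omega
    rw [hupper, Int.toNat_natCast]
    rw [scanA_eq_fold (grid.drop o) x y _ _ 0 pvMAX none (by omega)]
    have hu0 : (0 : Int) < ((grid.length - o - k : Nat) : Int) := by omega
    rw [PySem.List.pyRange_one_cons hu0, List.foldl_cons]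
    simp only [pvMAX]
    rw [if_pos (hcM 0 le_rfl hu0)]
    obtain ⟨j', hj0, hjE, hA, hB⟩ := fold_pair
      (fun t => pcost ((PySem.List.pyGet? grid t).getD []) x y)
      (fun t => pcost ((PySem.List.pyGet? (grid.drop o) t).getD []) x y)
      (o : Int) ((grid.length - o - k : Nat) : Int) (fun t h0 ht => hk t h0 ht)
      (grid.length - o - k - 1) 1 _ 0 (by omega) (by omega) le_rfl le_rfl hu0
    simp only [add_zero] at hA hB
    simp only [zero_add]
    rw [hA]
    simp only []
    -- unfold B's step
    rw [sPathAltLoop]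
    rw [if_pos (by exact_mod_cast Nat.succ_pos k : (0 : Int) < ((k + 1 : Nat) : Int))]
    simp only [bCost_eq]
    rw [min?_eq_foldl_bStep]
    have hstop : (grid.length : Int) - ((k + 1 : Nat) : Int) + 1
        = (o : Int) + ((grid.length - o - k : Nat) : Int) := by omega
    rw [hstop]
    have ho : (o : Int) < (o : Int) + ((grid.length - o - k : Nat) : Int) := by omega
    rw [PySem.List.pyRange_one_cons ho, List.foldl_cons]
    simp only [bStep]
    rw [hB]
    simp only []
    -- align the two recursive calls
    rw [pyGet?_shift grid o j' hj0]
    rw [hk j' hj0 hjE]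
    rw [PySem.List.slice_from _ (show (0 : Int) ≤ j' + 1 from by omega)]
    rw [List.drop_drop]
    obtain ⟨r, hr, hrm⟩ := hmem j' hj0 hjE
    rw [pyGet?_shift grid o j' hj0] at hr
    rw [hr, Option.getD_some]
    rw [show ((k + 1 : Nat) : Int) - 1 = ((k : Nat) : Int) from by push_cast; ring]
    rw [show (o : Int) + j' + 1 = ((o + j'.toNat + 1 : Nat) : Int) from by omega]
    rw [show o + (j' + 1).toNat = o + j'.toNat + 1 from by omega]
    rw [ih (o + j'.toNat + 1) _ _
      (total + pcost ((PySem.List.pyGet? (List.drop o grid) j').getD []) x y) (by omega)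
      (fun r2 hr2 => hgg r2 hr2 r hrm)]
    ring

-- ===== VERDICT (by name: the statement is the Claim_ definition above) =====
theorem s_path_spec : Claim_equal_s_path := by
  intro grid kill x y _hdom hpre
  obtain ⟨hk0, hkl, hrest⟩ := hpre
  obtain ⟨k, rfl⟩ : ∃ k : Nat, kill = (k : Int) := ⟨kill.toNat, by omega⟩
  show s_path grid _ x y = s_path_alt grid _ x y
  unfold s_path s_path_alt
  rw [Int.toNat_natCast]
  rcases hrest with hz | ⟨hlen, hcost⟩
  · have hz' : k = 0 := by exact_mod_cast hz
    subst hz'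
    rfl
  · have hgg : ∀ r ∈ grid, ∀ r' ∈ grid,
        pcost r ((PySem.List.pyGet? r' 0).getD 0) ((PySem.List.pyGet? r' 1).getD 0) < 999999999 := by
      intro r hr r' hr'
      have e0 : (PySem.List.pyGet? r' 0).getD 0 = r'.getD 0 0 := by
        rw [pyGet?_zero]; simp [List.getD]
      have e1 : (PySem.List.pyGet? r' 1).getD 0 = r'.getD 1 0 := by
        rw [pyGet?_one]; simp [List.getD]
      rw [pcost_eq_getD, e0, e1]
      exact hcost r hr _ (List.mem_cons_of_mem _ (List.mem_map_of_mem hr'))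
    have hxy0 : ∀ r ∈ grid, pcost r x y < 999999999 := by
      intro r hr
      rw [pcost_eq_getD]
      exact hcost r hr (x, y) List.mem_cons_self
    have hmain := main_loop grid hgg k 0 x y 0 (by omega) hxy0
    simp only [Nat.cast_zero, List.drop_zero, zero_add] at hmain
    exact hmain.symm
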